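-- pv_equiv track=rewrite | github.com/jimcor101/vendorMonitor | vendor_monitor.py | get_max_sentiment
-- ===== SOURCE A (Python) =====
-- from typing import List, Dict, Tuple, Optional
--
-- def get_max_sentiment(sentiments: List[str]) -> str:
--     """
--     Determine the maximum (most positive) sentiment from a list
--
--     Ranking: bullish > neutral > bearish
--
--     Args:
--         sentiments: List of sentiment strings
--
--     Returns:
--         Maximum sentiment value
--     """
--     if not sentiments or all(s == "N/A" for s in sentiments):
--         return "N/A"
--
--     # Filter out N/A values
--     valid_sentiments = [s for s in sentiments if s != "N/A"]
--
--     if not valid_sentiments: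
--         return "N/A"
--
--     # Priority: bullish > neutral > bearish
--     if "bullish" in valid_sentiments:
--         return "bullish"
--     elif "neutral" in valid_sentiments:
--         return "neutral"
--     else:
--         return "bearish"
-- ===== SOURCE B (Python) =====
-- def get_max_sentiment(sentiments):
--     priority = {"bullish": 3, "neutral": 2, "bearish": 1}
--     best = 0
--     for s in sentiments:
--         if s == "N/A":
--             continue
--         score = priority.get(s, 1)
--         if score > best:
--             best = score
--     if best == 0:
--         return "N/A"
--     if best == 3:
--         return "bullish"
--     if best == 2:
--         return "neutral"
--     return "bearish"
-- ===== Notes on version B (the rewrite author's own statement) =====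
-- stated objective: alternative
-- what changed: Replaces the filter pass plus up to three membership scans with a single pass keeping a running maximum priority score (unknown non-N/A strings score as bearish), mapping the final score back to its canonical name.
import Mathlib
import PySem

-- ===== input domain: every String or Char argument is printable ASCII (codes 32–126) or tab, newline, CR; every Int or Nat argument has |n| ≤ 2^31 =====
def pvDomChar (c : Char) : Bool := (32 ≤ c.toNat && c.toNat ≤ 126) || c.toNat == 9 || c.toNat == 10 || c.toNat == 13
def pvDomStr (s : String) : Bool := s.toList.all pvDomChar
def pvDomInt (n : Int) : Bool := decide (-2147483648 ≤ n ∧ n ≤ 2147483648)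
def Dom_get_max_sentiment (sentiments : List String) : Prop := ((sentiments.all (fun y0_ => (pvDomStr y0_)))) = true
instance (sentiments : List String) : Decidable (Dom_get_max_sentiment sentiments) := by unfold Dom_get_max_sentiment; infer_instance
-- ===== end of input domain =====

-- B replaces A's filter pass plus three membership scans by one pass keeping a running
-- maximum priority score; same return value everywhere (objective: alternative).

-- ===== PORT A =====
def get_max_sentiment (sentiments : List String) : String :=
  if sentiments = [] ∨ sentiments.all (fun s => s == "N/A") then "N/A"
  else
    let valid := sentiments.filter (fun s => s ≠ "N/A")
    if valid = [] then "N/A"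
    else if "bullish" ∈ valid then "bullish"
    else if "neutral" ∈ valid then "neutral"
    else "bearish"

-- ===== PORT B =====
-- priority.get(s, 1) with the literal dict
def pvScore (s : String) : Int :=
  if s = "bullish" then 3 else if s = "neutral" then 2 else 1

def get_max_sentiment_alt (sentiments : List String) : String :=
  let best := sentiments.foldl
    (fun best s =>
      if s = "N/A" then best
      else if pvScore s > best then pvScore s else best) (0 : Int)
  if best = 0 then "N/A"
  else if best = 3 then "bullish"
  else if best = 2 then "neutral"
  else "bearish"

-- ===== PRECONDITION & SPEC =====
def Spec_get_max_sentiment (sentiments : List String) (out : String) : Prop := out = get_max_sentiment_alt sentiments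
instance (sentiments : List String) (out : String) : Decidable (Spec_get_max_sentiment sentiments out) := by unfold Spec_get_max_sentiment; infer_instance

-- ===== CLAIM (what is proved, stated in full; the proofs are below) =====
def Claim_equal_get_max_sentiment : Prop := ∀ (sentiments : List String), Dom_get_max_sentiment sentiments → Spec_get_max_sentiment sentiments (get_max_sentiment sentiments)

-- ===== LEMMAS AND PROOFS =====

-- closed form of B's running maximum
def pvBest (xs : List String) : Int :=
  if "bullish" ∈ xs then 3
  else if "neutral" ∈ xs then 2
  else if xs.any (fun s => s ≠ "N/A") then 1
  else 0

theorem pvFoldl_eq_max (xs : List String) (acc : Int) (hacc : 0 ≤ acc) :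
    xs.foldl (fun best s =>
      if s = "N/A" then best
      else if pvScore s > best then pvScore s else best) acc = max acc (pvBest xs) := by
  induction xs generalizing acc with
  | nil => simp [pvBest]; omega
  | cons x xs ih =>
    have hstep : ∀ b : Int, 0 ≤ b → (0 : Int) ≤ (if pvScore x > b then pvScore x else b) := by
      intro b hb; unfold pvScore; split_ifs <;> omega
    simp only [List.foldl_cons]
    by_cases hx : x = "N/A"
    · rw [if_pos hx, ih acc hacc]
      have : pvBest (x :: xs) = pvBest xs := by
        subst hx; simp [pvBest]
      rw [this]
    · rw [if_neg hx, ih _ (hstep acc hacc)]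
      have hpb : pvBest (x :: xs) = max (pvScore x) (pvBest xs) := by
        unfold pvBest pvScore
        by_cases hb : x = "bullish" <;> by_cases hn : x = "neutral" <;>
          simp_all [List.mem_cons, List.any_cons] <;> split_ifs <;> simp_all
      rw [hpb]
      split_ifs <;> omega

theorem get_max_sentiment_eq_alt (xs : List String) :
    get_max_sentiment xs = get_max_sentiment_alt xs := by
  unfold get_max_sentiment get_max_sentiment_alt
  rw [pvFoldl_eq_max xs 0 le_rfl]
  have hB : "bullish" ≠ "N/A" := by decide
  have hN : "neutral" ≠ "N/A" := by decide
  by_cases hall : ∀ s ∈ xs, s = "N/A"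
  · have h1 : (xs = [] ∨ xs.all (fun s => s == "N/A") = true) := by
      right; simp only [List.all_eq_true, beq_iff_eq]; exact hall
    have h2 : pvBest xs = 0 := by
      unfold pvBest
      have hb' : "bullish" ∉ xs := fun h => hB (hall _ h)
      have hn' : "neutral" ∉ xs := fun h => hN (hall _ h)
      simp [hb', hn']
      exact hall
    rw [if_pos h1]
    simp [h2]
  · have hne : xs ≠ [] := by rintro rfl; exact hall (by simp)
    have h1 : ¬ (xs = [] ∨ xs.all (fun s => s == "N/A") = true) := by
      rintro (rfl | h)
      · exact hne rfl
      · exact hall (by simpa only [List.all_eq_true, beq_iff_eq] using h)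
    obtain ⟨w, hw, hwne⟩ : ∃ s ∈ xs, s ≠ "N/A" := by
      by_contra h
      exact hall fun s hs => by
        by_contra hne'
        exact h ⟨s, hs, hne'⟩
    have hfilt : xs.filter (fun s => s ≠ "N/A") ≠ [] := by
      intro h
      have := List.filter_eq_nil_iff.mp h w hw
      simp [hwne] at this
    have hmemB : ("bullish" ∈ xs.filter (fun s => s ≠ "N/A")) ↔ "bullish" ∈ xs := by
      simp [List.mem_filter, hB]
    have hmemN : ("neutral" ∈ xs.filter (fun s => s ≠ "N/A")) ↔ "neutral" ∈ xs := by
      simp [List.mem_filter, hN]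
    rw [if_neg h1, if_neg hfilt]
    unfold pvBest
    by_cases hbm : "bullish" ∈ xs
    · simp [hbm]
    · by_cases hnm : "neutral" ∈ xs
      · simp [hbm, hnm]
      · have hex : ∃ x ∈ xs, ¬ x = "N/A" := ⟨w, hw, hwne⟩
        simp [hbm, hnm, hex]

-- ===== VERDICT (by name: the statement is the Claim_ definition above) =====
theorem get_max_sentiment_spec : Claim_equal_get_max_sentiment := by
  intro xs _
  unfold Spec_get_max_sentiment
  exact get_max_sentiment_eq_alt xs
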